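-- pv_equiv track=rewrite | github.com/Aasthaengg/IBMdataset | Python_codes/p02406/s994396189.py | jyu_waru
-- ===== SOURCE A (Python) =====
-- def jyu_waru(a):
--     x = a
--     b = 0
--     while x>10:
--         x = x//10
--         if x%10 ==3:
--             b = a
--             break
--     return b
-- ===== SOURCE B (Python) =====
-- def jyu_waru(a):
--     return a if a > 10 and '3' in str(a)[:-1] else 0
-- ===== Notes on version B (the rewrite author's own statement) =====
-- stated objective: simpler
-- what changed: Replaced the divide-by-10 loop with accumulator and break by a one-line substring test: convert a to its decimal string, drop the last character (the units digit A never examines), and test whether '3' occurs in it (guarded by a > 10, the loop's entry condition).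
import Mathlib
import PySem

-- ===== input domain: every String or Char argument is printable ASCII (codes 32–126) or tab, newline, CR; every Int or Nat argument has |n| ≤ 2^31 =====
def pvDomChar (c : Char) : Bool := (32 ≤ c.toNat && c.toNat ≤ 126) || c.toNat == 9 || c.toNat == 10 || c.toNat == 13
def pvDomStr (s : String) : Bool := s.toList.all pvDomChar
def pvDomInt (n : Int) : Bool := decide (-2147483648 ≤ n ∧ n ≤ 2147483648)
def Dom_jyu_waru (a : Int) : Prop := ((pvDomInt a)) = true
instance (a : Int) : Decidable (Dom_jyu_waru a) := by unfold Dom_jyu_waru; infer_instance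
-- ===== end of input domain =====

-- B replaces A's divide-by-10 digit loop by one substring test on the decimal string minus
-- its last character; objective: simpler (same asymptotic cost).

-- ===== PORT A =====
-- 'while x>10: x = x//10; if x%10==3: b = a; break' — break returns b (= a just set)
def jyu_waruLoop (a x b : Int) : Int :=
  if 10 < x then
    let x' := PySem.Int.floordiv x 10
    if PySem.Int.mod x' 10 = 3 then a
    else jyu_waruLoop a x' b
  else b
termination_by x.toNat
decreasing_by
  have h1 : PySem.Int.floordiv x 10 = x / 10 := Int.fdiv_eq_ediv_of_nonneg x (by norm_num)
  have h2 : x / 10 < x := by omega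
  have h3 : 0 ≤ x / 10 := by omega
  rw [h1]; omega

def jyu_waru (a : Int) : Int := jyu_waruLoop a a 0

-- ===== PORT B =====
-- return a if a > 10 and '3' in str(a)[:-1] else 0
def jyu_waru_alt (a : Int) : Int :=
  if (decide (10 < a) && PySem.Str.isIn "3" (PySem.Str.slice (PySem.Int.toStr a) none (some (-1)))) = true
  then a else 0

-- ===== PRECONDITION & SPEC =====
def Spec_jyu_waru (a : Int) (out : Int) : Prop := out = jyu_waru_alt a
instance (a : Int) (out : Int) : Decidable (Spec_jyu_waru a out) := by unfold Spec_jyu_waru; infer_instance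

-- ===== CLAIM (what is proved, stated in full; the proofs are below) =====
def Claim_equal_jyu_waru : Prop := ∀ (a : Int), Dom_jyu_waru a → Spec_jyu_waru a (jyu_waru a)

-- ===== LEMMAS AND PROOFS =====

-- does the decimal expansion of n contain the digit 3?
def natHas3 (n : Nat) : Bool :=
  if h : n / 10 = 0 then n % 10 == 3
  else (n % 10 == 3) || natHas3 (n / 10)
decreasing_by exact Nat.div_lt_self (by omega) (by omega)

theorem three_eq_digitChar (m : Nat) (h : m < 10) : ('3' = Nat.digitChar m) ↔ m = 3 := by
  interval_cases m <;> simp [Nat.digitChar]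

theorem toDigitsCore_append (fuel n : Nat) (ds : List Char) :
    Nat.toDigitsCore 10 fuel n ds = Nat.toDigitsCore 10 fuel n [] ++ ds := by
  induction fuel generalizing n ds with
  | zero => simp [Nat.toDigitsCore]
  | succ f ih =>
    simp only [Nat.toDigitsCore]
    split
    · simp
    · rw [ih (n / 10) (Nat.digitChar (n % 10) :: ds), ih (n / 10) [Nat.digitChar (n % 10)]]
      simp

theorem mem_toDigitsCore (fuel n : Nat) (h : n < fuel) :
    '3' ∈ Nat.toDigitsCore 10 fuel n [] ↔ natHas3 n = true := by
  induction fuel generalizing n with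
  | zero => omega
  | succ f ih =>
    simp only [Nat.toDigitsCore]
    by_cases h0 : n / 10 = 0
    · rw [natHas3, dif_pos h0]
      simp [h0, three_eq_digitChar (n % 10) (by omega)]
    · have h10 : 10 ≤ n := by omega
      have hlt : n / 10 < f := by
        have : n / 10 < n := Nat.div_lt_self (by omega) (by norm_num)
        omega
      rw [if_neg h0, toDigitsCore_append f (n / 10) [Nat.digitChar (n % 10)]]
      rw [natHas3, dif_neg h0]
      simp only [List.mem_append, List.mem_singleton, ih (n / 10) hlt,
        three_eq_digitChar (n % 10) (by omega), Bool.or_eq_true, beq_iff_eq]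
      tauto

theorem dropLast_toDigits (n : Nat) (h0 : n / 10 ≠ 0) :
    (Nat.toDigits 10 n).dropLast = Nat.toDigitsCore 10 n (n / 10) [] := by
  rw [Nat.toDigits]
  conv_lhs => rw [Nat.toDigitsCore]
  rw [if_neg h0, toDigitsCore_append n (n / 10) [Nat.digitChar (n % 10)]]
  exact List.dropLast_concat ..

theorem singleton_infix_iff (c : Char) (l : List Char) : [c] <:+: l ↔ c ∈ l := by
  constructor
  · intro h; exact h.subset (List.mem_singleton_self c)
  · intro h
    obtain ⟨s, t, rfl⟩ := List.append_of_mem h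
    exact ⟨s, t, by simp⟩

theorem jyu_waruLoop_eq (a b x : Int) (h : 10 < x) :
    jyu_waruLoop a x b = if natHas3 (x.toNat / 10) then a else b := by
  generalize hn : x.toNat = n
  induction n using Nat.strong_induction_on generalizing x with
  | _ n ih =>
    have hx : x = (n : Int) := by omega
    subst hx
    have hn10 : 10 < n := by omega
    rw [jyu_waruLoop, if_pos h]
    have hfd : PySem.Int.floordiv (n : Int) 10 = ((n / 10 : Nat) : Int) := by
      rw [PySem.Int.floordiv, Int.fdiv_eq_ediv_of_nonneg _ (by norm_num)]
      exact_mod_cast (Int.natCast_div n 10).symm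
    have hfm : PySem.Int.mod (((n / 10 : Nat) : Int)) 10 = ((n / 10 % 10 : Nat) : Int) := by
      rw [PySem.Int.mod, Int.fmod_eq_emod_of_nonneg _ (by norm_num)]
      exact_mod_cast (Int.natCast_mod (n / 10) 10).symm
    have htn : (((n / 10 : Nat) : Int)).toNat = n / 10 := Int.toNat_natCast _
    simp only [hfd, hfm]
    by_cases h3 : n / 10 % 10 = 3
    · rw [if_pos (by exact_mod_cast h3)]
      have hh : natHas3 (n / 10) = true := by
        rw [natHas3]; split <;> simp [h3]
      simp [hh]
    · rw [if_neg (by exact_mod_cast h3)]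
      by_cases hc : (10 : Int) < ((n / 10 : Nat) : Int)
      · have hlt : n / 10 < n := Nat.div_lt_self (by omega) (by norm_num)
        rw [ih (n / 10) hlt _ hc htn]
        have hh : natHas3 (n / 10) = natHas3 (n / 10 / 10) := by
          rw [natHas3, dif_neg (by omega)]
          simp [h3]
        rw [hh]
      · rw [jyu_waruLoop, if_neg hc]
        have hle : n / 10 ≤ 10 := by omega
        have hh : natHas3 (n / 10) = false := by
          by_cases h00 : n / 10 / 10 = 0
          · rw [natHas3, dif_pos h00]; simp [h3]
          · have h10 : n / 10 = 10 := by omega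
            rw [natHas3, dif_neg h00, h10]
            norm_num
            rw [natHas3]
            norm_num
        simp [hh]

-- ===== VERDICT (by name: the statement is the Claim_ definition above) =====
theorem jyu_waru_spec : Claim_equal_jyu_waru := by
  intro a _
  unfold Spec_jyu_waru jyu_waru jyu_waru_alt
  by_cases h : 10 < a
  · have hn : 11 ≤ a.toNat := by omega
    rw [jyu_waruLoop_eq a 0 a h]
    have hts : (PySem.Int.toStr a).toList = Nat.toDigits 10 a.toNat := by
      rw [PySem.Int.toList_toStr, PySem.Int.toChars, if_neg (by omega)]
    have hslice : (PySem.Str.slice (PySem.Int.toStr a) none (some (-1))).toList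
        = (Nat.toDigits 10 a.toNat).dropLast := by
      rw [PySem.Str.slice, String.toList_ofList, PySem.Chars.slice_eq_listSlice,
        PySem.List.slice_to_neg_one, hts]
    have h0 : a.toNat / 10 ≠ 0 := by omega
    have hmem : PySem.Str.isIn "3" (PySem.Str.slice (PySem.Int.toStr a) none (some (-1)))
        = natHas3 (a.toNat / 10) := by
      rw [PySem.Str.isIn_eq]
      rw [show ("3" : String).toList = ['3'] from rfl]
      rw [Bool.eq_iff_iff, PySem.Chars.isIn_iff_infix, hslice, singleton_infix_iff,
        dropLast_toDigits _ h0, mem_toDigitsCore _ _ (by omega)]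
    rw [hmem]
    simp [h]
  · rw [jyu_waruLoop, if_neg h]
    simp [h]
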